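-- pv_equiv track=rewrite | github.com/SAHIL511-JJ/leetcode-problems | piling_up.py | piling_up
-- ===== SOURCE A (Python) =====
-- from collections import deque
--
-- def piling_up(blocks):
--     d = deque(blocks)
--     last = float('inf')
--
--     while d:
--         if d[0] >= d[-1]:
--             curr = d.popleft()
--         else:
--             curr = d.pop()
--
--         if curr > last:
--             return "No"
--         last = curr
--
--     return "Yes"
-- ===== SOURCE B (Python) =====
-- def piling_up(blocks):
--     if not blocks:
--         return "Yes"
--     prev = blocks[0]
--     ascending = False
--     for x in blocks[1:]:
--         if ascending:
--             if x < prev: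
--                 return "No"
--         else:
--             if x > prev:
--                 ascending = True
--         prev = x
--     return "Yes"
-- ===== Notes on version B (the rewrite author's own statement) =====
-- stated objective: simpler
-- what changed: Replaces the two-ended deque greedy with a single forward scan that checks the list is valley-shaped (non-increasing then non-decreasing) via a phase flag.
import Mathlib
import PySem

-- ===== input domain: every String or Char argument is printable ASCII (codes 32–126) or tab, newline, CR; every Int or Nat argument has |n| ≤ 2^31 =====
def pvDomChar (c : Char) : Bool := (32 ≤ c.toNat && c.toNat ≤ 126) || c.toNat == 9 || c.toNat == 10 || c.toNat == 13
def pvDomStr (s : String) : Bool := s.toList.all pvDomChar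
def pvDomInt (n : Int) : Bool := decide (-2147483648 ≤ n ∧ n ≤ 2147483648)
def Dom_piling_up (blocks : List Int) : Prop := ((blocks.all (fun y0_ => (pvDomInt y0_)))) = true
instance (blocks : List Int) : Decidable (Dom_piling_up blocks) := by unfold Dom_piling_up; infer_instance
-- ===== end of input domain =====

-- B replaces A's two-ended deque greedy by a single forward valley-shape scan (objective: simpler).

-- ===== PORT A =====
-- `last = float('inf')` is modelled as `Option Int` with `none` = +inf:
-- `curr > float('inf')` is always False in Python, exactly `pyGtLast curr none = false`.
def pyGtLast (curr : Int) (last : Option Int) : Bool :=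
  match last with
  | none => false
  | some l => decide (curr > l)

-- the deque `d`; `d[0]` = head, `d[-1]` = getLast (both in range: the loop runs while d ≠ [])
def pilingLoop : List Int → Option Int → String
  | [], _ => "Yes"
  | h :: t, last =>
    let b := (h :: t).getLast (List.cons_ne_nil h t)
    if h ≥ b then
      -- curr = d.popleft()
      if pyGtLast h last then "No" else pilingLoop t (some h)
    else
      -- curr = d.pop()
      if pyGtLast b last then "No" else pilingLoop ((h :: t).dropLast) (some b)
  termination_by d _ => d.length
  decreasing_by
  · simp
  · simp

def piling_up (blocks : List Int) : String := pilingLoop blocks none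

-- ===== PORT B =====
def scanB : Int → Bool → List Int → String
  | _, _, [] => "Yes"
  | prev, true, x :: xs =>
    if x < prev then "No" else scanB x true xs
  | prev, false, x :: xs =>
    if x > prev then scanB x true xs else scanB x false xs

def piling_up_alt (blocks : List Int) : String :=
  match blocks with
  | [] => "Yes"
  | x :: xs => scanB x false xs

-- ===== PRECONDITION & SPEC =====
def Spec_piling_up (blocks : List Int) (out : String) : Prop := out = piling_up_alt blocks
instance (blocks : List Int) (out : String) : Decidable (Spec_piling_up blocks out) := by unfold Spec_piling_up; infer_instance

-- ===== CLAIM (what is proved, stated in full; the proofs are below) =====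
def Claim_equal_piling_up : Prop := ∀ (blocks : List Int), Dom_piling_up blocks → Spec_piling_up blocks (piling_up blocks)

-- ===== LEMMAS AND PROOFS =====

-- "valley-shaped": a non-increasing prefix followed by a non-decreasing suffix
def Valley (d : List Int) : Prop :=
  ∃ xs ys, d = xs ++ ys ∧ List.IsChain (· ≥ ·) xs ∧ List.IsChain (· ≤ ·) ys

-- `x ≤ last` with none = +inf
def optLE (x : Int) (last : Option Int) : Prop :=
  match last with
  | none => True
  | some l => x ≤ l

theorem pyGtLast_eq_false {x : Int} {last : Option Int} :
    pyGtLast x last = false ↔ optLE x last := by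
  cases last with
  | none => simp [pyGtLast, optLE]
  | some l => simp [pyGtLast, optLE]

theorem optLE_trans {x y : Int} {last : Option Int} (hxy : x ≤ y) (h : optLE y last) :
    optLE x last := by
  cases last with
  | none => trivial
  | some l => simp [optLE] at h ⊢; omega

theorem valley_nil : Valley [] := ⟨[], [], rfl, List.isChain_nil, List.isChain_nil⟩

theorem valley_cons_front {h : Int} {t : List Int} (hle : ∀ y ∈ t.head?, y ≤ h)
    (hv : Valley t) : Valley (h :: t) := by
  obtain ⟨xs, ys, rfl, cx, cy⟩ := hv
  cases xs with
  | nil => exact ⟨[h], ys, rfl, List.isChain_singleton h, cy⟩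
  | cons a xs' =>
    refine ⟨h :: a :: xs', ys, rfl, ?_, cy⟩
    refine List.isChain_cons.2 ⟨?_, cx⟩
    intro y hy
    simp only [List.head?_cons, Option.mem_def, Option.some.injEq] at hy
    subst hy
    exact hle a (by simp)

theorem chain_le_head_last {t : List Int} (c : List.IsChain (· ≤ ·) t)
    {a b : Int} (ha : t.head? = some a) (hb : t.getLast? = some b) : a ≤ b := by
  obtain ⟨ys, rfl⟩ := List.getLast?_eq_some_iff.1 hb
  cases ys with
  | nil =>
    have : b = a := by simpa using ha
    omega
  | cons y ys' =>
    have hya : y = a := by simpa using ha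
    subst hya
    have hp := (List.isChain_iff_pairwise).1 c
    exact (List.pairwise_cons.1 hp).1 b (by simp)

theorem chain_ge_head_last {t : List Int} (c : List.IsChain (· ≥ ·) t)
    {a b : Int} (ha : t.head? = some a) (hb : t.getLast? = some b) : b ≤ a := by
  obtain ⟨ys, rfl⟩ := List.getLast?_eq_some_iff.1 hb
  cases ys with
  | nil =>
    have : b = a := by simpa using ha
    omega
  | cons y ys' =>
    have hya : y = a := by simpa using ha
    subst hya
    have hp := (List.isChain_iff_pairwise).1 c
    exact (List.pairwise_cons.1 hp).1 b (by simp)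

-- removing the front element, when it dominates the back
theorem valley_cons_elim {h : Int} {t : List Int}
    (hb : ∀ y ∈ (h :: t).getLast?, y ≤ h) (hv : Valley (h :: t)) :
    Valley t ∧ ∀ y ∈ t.head?, y ≤ h := by
  obtain ⟨xs, ys, heq, cx, cy⟩ := hv
  cases xs with
  | nil =>
    simp only [List.nil_append] at heq
    subst heq
    refine ⟨⟨[], t, rfl, List.isChain_nil, cy.tail⟩, ?_⟩
    intro y hy
    cases t with
    | nil => simp at hy
    | cons z t' =>
      have hzy : z = y := by simpa using hy
      subst hzy
      obtain ⟨L, hL⟩ : ∃ L, (z :: t').getLast? = some L :=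
        ⟨_, List.getLast?_eq_some_getLast (by simp)⟩
      have h1 : z ≤ L := chain_le_head_last cy.tail (by simp) hL
      have h2 : L ≤ h := hb L (by rw [List.getLast?_cons_cons]; exact hL)
      omega
  | cons a xs' =>
    have ha : h = a := by simpa using congrArg List.head? heq
    subst ha
    have ht : t = xs' ++ ys := by simpa using heq
    subst ht
    refine ⟨⟨xs', ys, rfl, cx.tail, cy⟩, ?_⟩
    intro y hy
    cases xs' with
    | nil =>
      simp only [List.nil_append] at hy ⊢
      obtain ⟨L, hL⟩ : ∃ L, ys.getLast? = some L := by
        cases ys with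
        | nil => simp at hy
        | cons z ys' => exact ⟨_, List.getLast?_eq_some_getLast (by simp)⟩
      have h1 : y ≤ L := chain_le_head_last cy hy hL
      have h2 : L ≤ h := by
        simp only [List.nil_append] at hb
        apply hb L
        have hysne : ys ≠ [] := by cases ys <;> simp_all
        have : (h :: ys) = [h] ++ ys := rfl
        rw [this, List.getLast?_append_of_ne_nil _ hysne]
        exact hL
      omega
    | cons z xs'' =>
      have hzy : z = y := by simpa using hy
      subst hzy
      exact (List.isChain_cons.1 cx).1 z (by simp)

-- appending a back element that dominates the current back
theorem valley_concat {t : List Int} {b : Int} (hlast : ∀ y ∈ t.getLast?, y ≤ b)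
    (hv : Valley t) : Valley (t ++ [b]) := by
  obtain ⟨xs, ys, rfl, cx, cy⟩ := hv
  cases ys.eq_nil_or_concat with
  | inl hnil =>
    subst hnil
    exact ⟨xs, [b], by simp, cx, List.isChain_singleton b⟩
  | inr h =>
    obtain ⟨ys', y, hys⟩ := h
    rw [List.concat_eq_append] at hys
    subst hys
    refine ⟨xs, (ys' ++ [y]) ++ [b], by simp, cx, ?_⟩
    refine cy.append (List.isChain_singleton b) ?_
    intro u hu v hv
    simp only [List.head?_cons, Option.mem_def, Option.some.injEq] at hv
    subst hv
    apply hlast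
    rw [List.getLast?_append_of_ne_nil _ (l₂ := ys' ++ [y]) (by simp)]
    exact hu

-- removing the back element, when the front is strictly below it
theorem valley_concat_elim {h : Int} {t' : List Int} {b : Int} (hlt : h < b)
    (hv : Valley ((h :: t') ++ [b])) :
    Valley (h :: t') ∧ ∀ y ∈ (h :: t').getLast?, y ≤ b := by
  obtain ⟨xs, ys, heq, cx, cy⟩ := hv
  cases ys.eq_nil_or_concat with
  | inl hnil =>
    subst hnil
    simp only [List.append_nil] at heq
    subst heq
    exfalso
    have hble : b ≤ h := by
      refine chain_ge_head_last cx (a := h) (by simp) ?_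
      rw [List.getLast?_append_of_ne_nil _ (by simp)]; simp
    omega
  | inr hc =>
    obtain ⟨ys', y, hys⟩ := hc
    rw [List.concat_eq_append] at hys
    subst hys
    have heq2 : xs ++ ys' = h :: t' ∧ [y] = [b] := by
      refine List.append_inj' ?_ (by simp)
      rw [List.append_assoc]
      exact heq.symm
    obtain ⟨hxy, hyb⟩ := heq2
    have hyb2 : b = y := by simpa using hyb.symm
    subst hyb2
    have cys' : List.IsChain (· ≤ ·) ys' := cy.left_of_append
    have hjunc : ∀ u ∈ ys'.getLast?, u ≤ b := by
      intro u hu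
      exact (List.isChain_append.1 cy).2.2 u hu b (by simp)
    refine ⟨⟨xs, ys', hxy.symm, cx, cys'⟩, ?_⟩
    intro u hu
    rw [← hxy] at hu
    cases ys'.eq_nil_or_concat with
    | inl hnil =>
      subst hnil
      simp only [List.append_nil] at hxy hu
      have huh : u ≤ h := by
        refine chain_ge_head_last cx (a := h) ?_ hu
        rw [hxy]; simp
      omega
    | inr hcc =>
      obtain ⟨zs, z, hzs⟩ := hcc
      rw [List.concat_eq_append] at hzs
      subst hzs
      rw [List.getLast?_append_of_ne_nil _ (by simp)] at hu
      have hz : z = u := by simpa using hu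
      subst hz
      exact hjunc z (by simp)

-- scanB in ascending phase accepts exactly the ≤-chains
theorem scan_true (xs : List Int) : ∀ p, scanB p true xs = "Yes" ↔ List.IsChain (· ≤ ·) (p :: xs) := by
  induction xs with
  | nil => intro p; simp [scanB]
  | cons x xs ih =>
    intro p
    simp only [scanB]
    by_cases hx : x < p
    · rw [if_pos hx]
      rw [List.isChain_cons_cons]
      constructor
      · intro hno; exact absurd hno (by simp)
      · intro ⟨hpx, _⟩; omega
    · rw [if_neg hx]
      rw [ih x, List.isChain_cons_cons]
      constructor
      · intro hc; exact ⟨by omega, hc⟩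
      · intro ⟨_, hc⟩; exact hc

theorem valley_asc {p x : Int} {xs : List Int} (hpx : p < x) :
    Valley (p :: x :: xs) ↔ List.IsChain (· ≤ ·) (x :: xs) := by
  constructor
  · rintro ⟨as, bs, heq, ca, cb⟩
    cases as with
    | nil => simp only [List.nil_append] at heq; subst heq; exact cb.tail
    | cons a as' =>
      have ha : p = a := by simpa using congrArg List.head? heq
      subst ha
      cases as' with
      | nil =>
        have hbs : x :: xs = bs := by simpa using heq
        rw [← hbs] at cb
        exact cb
      | cons a2 as'' =>
        obtain ⟨h1, h2⟩ : x = a2 ∧ xs = as'' ++ bs := by simpa using heq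
        exact absurd (List.isChain_cons_cons.1 ca).1 (by omega)
  · intro hc; exact ⟨[p], x :: xs, rfl, List.isChain_singleton p, hc⟩

theorem valley_cons_le {p x : Int} {xs : List Int} (hxp : x ≤ p) :
    Valley (p :: x :: xs) ↔ Valley (x :: xs) := by
  constructor
  · rintro ⟨as, bs, heq, ca, cb⟩
    cases as with
    | nil =>
      simp only [List.nil_append] at heq; subst heq
      exact ⟨[], x :: xs, rfl, List.isChain_nil, cb.tail⟩
    | cons a as' =>
      have ha : p = a := by simpa using congrArg List.head? heq
      subst ha
      cases as' with
      | nil =>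
        have hbs : x :: xs = bs := by simpa using heq
        rw [← hbs] at cb
        exact ⟨[], x :: xs, rfl, List.isChain_nil, cb⟩
      | cons a2 as'' =>
        obtain ⟨h1, h2⟩ : x = a2 ∧ xs = as'' ++ bs := by simpa using heq
        exact ⟨a2 :: as'', bs, by simp [h1, h2], ca.tail, cb⟩
  · intro hv
    exact valley_cons_front (by simpa using hxp) hv

theorem scan_false (xs : List Int) : ∀ p, scanB p false xs = "Yes" ↔ Valley (p :: xs) := by
  induction xs with
  | nil =>
    intro p
    constructor
    · intro _; exact ⟨[p], [], by simp, List.isChain_singleton p, List.isChain_nil⟩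
    · intro _; rfl
  | cons x xs ih =>
    intro p
    simp only [scanB]
    by_cases hx : x > p
    · rw [if_pos hx]
      rw [scan_true, valley_asc hx]
    · rw [if_neg hx]
      rw [ih x, valley_cons_le (by omega)]

-- main characterisation of A's loop
theorem pilingLoop_char : ∀ n (d : List Int), d.length ≤ n → ∀ last,
    (pilingLoop d last = "Yes" ↔
      Valley d ∧ (∀ y ∈ d.head?, optLE y last) ∧ (∀ y ∈ d.getLast?, optLE y last)) := by
  intro n
  induction n with
  | zero =>
    intro d hd last
    have : d = [] := List.length_eq_zero_iff.1 (by omega)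
    subst this
    simp [pilingLoop, valley_nil]
  | succ n ih =>
    intro d hd last
    cases d with
    | nil => simp [pilingLoop, valley_nil]
    | cons h t =>
      have hlen : t.length ≤ n := by simp at hd; omega
      have hb' : (h :: t).getLast? = some ((h :: t).getLast (List.cons_ne_nil h t)) :=
        List.getLast?_eq_some_getLast _
      simp only [pilingLoop]
      by_cases hcmp : h ≥ (h :: t).getLast (List.cons_ne_nil h t)
      · rw [if_pos hcmp]
        by_cases hgt : pyGtLast h last = true
        · rw [if_pos hgt]
          constructor
          · intro hno; exact absurd hno (by simp)
          · rintro ⟨_, hh, _⟩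
            have := hh h (by simp)
            rw [← pyGtLast_eq_false] at this
            rw [hgt] at this
            exact absurd this (by simp)
        · rw [if_neg hgt]
          have hle : optLE h last := pyGtLast_eq_false.1 (by simpa using hgt)
          rw [ih t hlen (some h)]
          constructor
          · rintro ⟨vt, hh, hl⟩
            refine ⟨valley_cons_front (by intro y hy; exact hh y hy) vt, ?_, ?_⟩
            · intro y hy
              have : h = y := by simpa using hy
              subst this; exact hle
            · intro y hy
              rw [hb'] at hy
              have hy' : (h :: t).getLast (List.cons_ne_nil h t) = y := by simpa using hy
              subst hy'
              exact optLE_trans hcmp hle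
          · rintro ⟨vht, _, _⟩
            have helim := valley_cons_elim ?_ vht
            · obtain ⟨vt, hh⟩ := helim
              refine ⟨vt, hh, ?_⟩
              intro y hy
              cases t with
              | nil => simp at hy
              | cons z t' =>
                have : (h :: z :: t').getLast? = (z :: t').getLast? := List.getLast?_cons_cons
                have hy2 : y ∈ (h :: z :: t').getLast? := by rw [this]; exact hy
                rw [hb'] at hy2
                have : (h :: z :: t').getLast (List.cons_ne_nil h _) = y := by simpa using hy2
                subst this
                exact hcmp
            · intro y hy
              rw [hb'] at hy
              have : (h :: t).getLast (List.cons_ne_nil h t) = y := by simpa using hy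
              subst this
              exact hcmp
      · rw [if_neg hcmp]
        have hlt : h < (h :: t).getLast (List.cons_ne_nil h t) := by omega
        -- t ≠ [] (otherwise getLast = h, contradicting h < getLast)
        have htne : t ≠ [] := by
          intro hnil; subst hnil; simp at hlt
        obtain ⟨ys, hys⟩ := List.getLast?_eq_some_iff.1 hb'
        have hysne : ys ≠ [] := by
          intro hnil; rw [hnil] at hys; simp at hys
          obtain ⟨h1, h2⟩ := hys
          subst h2; simp at htne
        obtain ⟨t', hys'⟩ : ∃ t', ys = h :: t' := by
          cases ys with
          | nil => exact absurd rfl hysne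
          | cons a ys' =>
            have : h = a := by simpa using congrArg List.head? hys
            subst this; exact ⟨ys', rfl⟩
        subst hys'
        have hdrop : (h :: t).dropLast = h :: t' := by
          rw [hys, List.dropLast_concat]
        rw [hdrop]
        set B := (h :: t).getLast (List.cons_ne_nil h t) with hB
        by_cases hgt : pyGtLast B last = true
        · rw [if_pos hgt]
          constructor
          · intro hno; exact absurd hno (by simp)
          · rintro ⟨_, _, hl⟩
            have := hl B (by rw [hb']; rfl)
            rw [← pyGtLast_eq_false] at this
            rw [hgt] at this
            exact absurd this (by simp)
        · rw [if_neg hgt]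
          have hle : optLE B last := pyGtLast_eq_false.1 (by simpa using hgt)
          have hlen' : (h :: t').length ≤ n := by
            have := congrArg List.length hys
            simp at this ⊢
            omega
          rw [ih (h :: t') hlen' (some B)]
          constructor
          · rintro ⟨v, _, hl⟩
            refine ⟨?_, ?_, ?_⟩
            · rw [hys]
              exact valley_concat (by intro y hy; exact hl y hy) v
            · intro y hy
              have : h = y := by simpa using hy
              subst this
              exact optLE_trans (by omega) hle
            · intro y hy
              rw [hb'] at hy
              have : B = y := by simpa using hy
              subst this
              exact hle
          · rintro ⟨vht, _, _⟩
            rw [hys] at vht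
            have helim := valley_concat_elim hlt vht
            obtain ⟨v, hl⟩ := helim
            refine ⟨v, ?_, hl⟩
            intro y hy
            have : h = y := by simpa using hy
            subst this
            simp only [optLE]
            omega

-- the two possible outputs
theorem pilingLoop_out : ∀ n (d : List Int), d.length ≤ n → ∀ last,
    pilingLoop d last = "Yes" ∨ pilingLoop d last = "No" := by
  intro n
  induction n with
  | zero =>
    intro d hd last
    have : d = [] := List.length_eq_zero_iff.1 (by omega)
    subst this; simp [pilingLoop]
  | succ n ih =>
    intro d hd last
    cases d with
    | nil => simp [pilingLoop]
    | cons h t =>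
      simp only [pilingLoop]
      split
      · split
        · right; rfl
        · exact ih t (by simp at hd; omega) _
      · split
        · right; rfl
        · refine ih ((h :: t).dropLast) ?_ _
          simp only [List.length_dropLast, List.length_cons]
          simp at hd ⊢
          omega

theorem scanB_out : ∀ (xs : List Int) (p : Int) (asc : Bool),
    scanB p asc xs = "Yes" ∨ scanB p asc xs = "No" := by
  intro xs
  induction xs with
  | nil => intro p asc; left; rfl
  | cons x xs ih =>
    intro p asc
    cases asc
    · simp only [scanB]
      split
      · exact ih x true
      · exact ih x false
    · simp only [scanB]
      split
      · right; rfl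
      · exact ih x true

theorem piling_up_alt_out (d : List Int) : piling_up_alt d = "Yes" ∨ piling_up_alt d = "No" := by
  cases d with
  | nil => left; rfl
  | cons x xs => exact scanB_out xs x false

theorem A_char (d : List Int) : piling_up d = "Yes" ↔ Valley d := by
  rw [piling_up, pilingLoop_char d.length d le_rfl none]
  simp [optLE]

theorem B_char (d : List Int) : piling_up_alt d = "Yes" ↔ Valley d := by
  cases d with
  | nil => simp only [piling_up_alt]; simp [valley_nil]
  | cons x xs => rw [piling_up_alt, scan_false]

-- ===== VERDICT (by name: the statement is the Claim_ definition above) =====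
theorem piling_up_spec : Claim_equal_piling_up := by
  intro blocks _
  unfold Spec_piling_up
  have hA := A_char blocks
  have hB := B_char blocks
  cases pilingLoop_out blocks.length blocks le_rfl none with
  | inl h =>
    have h' : piling_up blocks = "Yes" := h
    rw [h', hB.2 (hA.1 h')]
  | inr h =>
    have h' : piling_up blocks = "No" := h
    rw [h']
    cases piling_up_alt_out blocks with
    | inl h2 =>
      exfalso
      have := hA.2 (hB.1 h2)
      rw [h'] at this
      exact absurd this (by simp)
    | inr h2 => rw [h2]
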